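-- pv_equiv track=rewrite | github.com/tiaguu/ios-nights-watch | learning/simplex_model.py | find_opcode_key
-- ===== SOURCE A (Python) =====
-- def find_opcode_key(opcode_value):
--     opcodes = {
--         0 : ['b', 'bl', 'bx', 'blx'], # Unconditional Branches
--         1 : ['b.eq', 'b.ne', 'b.lt', 'b.gt', 'b.le', 'b.ge', 'b.hi', 'b.lo', 'b.pl', 'b.mi', 'b.vs', 'b.vc', 'b.cs', 'b.cc', 'b.al', 'b.nv'], # Conditional Branches
--         2 : ['cbz', 'cbnz'], # Compare and Branch
--         3 : ['tbz', 'tbnz'], # Test and Branch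
--         4 : ['ret', 'eret'], # Return Instructions
--         5 : ['svc', 'hvc', 'smc', 'brk', 'hlt'], # Exception Generation
--         6 : ['br', 'blr', 'braa', 'brab', 'retab'], # Indirect Branching
--         7 : ['nop', 'yield', 'wfe', 'wfi', 'sev', 'sevl', 'isb', 'dmb', 'dsb'] # Hints
--     }
--
--     for key, values in opcodes.items():
--         if opcode_value in values:
--             return key
--     return None
-- ===== SOURCE B (Python) =====
-- # Binary search over a flat (opcode, key) table kept sorted by opcode.
-- _PAIRS = [
--     ("b", 0), ("b.al", 1), ("b.cc", 1), ("b.cs", 1), ("b.eq", 1), ("b.ge", 1), ("b.gt", 1),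
--     ("b.hi", 1), ("b.le", 1), ("b.lo", 1), ("b.lt", 1), ("b.mi", 1), ("b.ne", 1), ("b.nv", 1),
--     ("b.pl", 1), ("b.vc", 1), ("b.vs", 1), ("bl", 0), ("blr", 6), ("blx", 0), ("br", 6),
--     ("braa", 6), ("brab", 6), ("brk", 5), ("bx", 0), ("cbnz", 2), ("cbz", 2), ("dmb", 7),
--     ("dsb", 7), ("eret", 4), ("hlt", 5), ("hvc", 5), ("isb", 7), ("nop", 7), ("ret", 4),
--     ("retab", 6), ("sev", 7), ("sevl", 7), ("smc", 5), ("svc", 5), ("tbnz", 3), ("tbz", 3),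
--     ("wfe", 7), ("wfi", 7), ("yield", 7),
-- ]
--
-- def find_opcode_key(opcode_value):
--     lo, hi = 0, len(_PAIRS)
--     while lo < hi:
--         mid = (lo + hi) // 2
--         v, k = _PAIRS[mid]
--         if v == opcode_value:
--             return k
--         elif v < opcode_value:
--             lo = mid + 1
--         else:
--             hi = mid
--     return None
-- ===== Notes on version B (the rewrite author's own statement) =====
-- stated objective: alternative
-- what changed: B replaces A's linear scan over eight category lists with a hand-maintained sorted (opcode, key) table queried by binary search, so the answer comes from O(log n) string comparisons instead of membership tests over every category.
import Mathlib
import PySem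

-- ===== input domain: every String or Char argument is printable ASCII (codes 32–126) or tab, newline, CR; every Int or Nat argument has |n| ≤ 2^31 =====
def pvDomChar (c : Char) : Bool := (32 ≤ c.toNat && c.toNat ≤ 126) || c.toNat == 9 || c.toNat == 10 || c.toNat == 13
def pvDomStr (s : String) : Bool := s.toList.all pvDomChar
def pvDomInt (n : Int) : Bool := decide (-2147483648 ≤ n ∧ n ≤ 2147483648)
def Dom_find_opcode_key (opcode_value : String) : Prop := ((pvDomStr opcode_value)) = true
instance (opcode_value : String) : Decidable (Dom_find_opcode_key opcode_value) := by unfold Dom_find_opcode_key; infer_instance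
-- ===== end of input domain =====

-- B answers by binary search over a sorted flat (opcode, key) table instead of
-- A's linear scan of categories with a membership test per category (alternative algorithm).
-- Strings are handled as their character lists (PySem convention), exact on the ASCII domain.

-- ===== PORT A =====
-- the literal dict of A (insertion order 0..7); values as character lists
def pvOpcodesTable : PySem.Dict Int (List (List Char)) := PySem.Dict.ofList [
  (0, ["b".toList, "bl".toList, "bx".toList, "blx".toList]),
  (1, ["b.eq".toList, "b.ne".toList, "b.lt".toList, "b.gt".toList, "b.le".toList, "b.ge".toList, "b.hi".toList, "b.lo".toList, "b.pl".toList, "b.mi".toList, "b.vs".toList, "b.vc".toList, "b.cs".toList, "b.cc".toList, "b.al".toList, "b.nv".toList]),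
  (2, ["cbz".toList, "cbnz".toList]),
  (3, ["tbz".toList, "tbnz".toList]),
  (4, ["ret".toList, "eret".toList]),
  (5, ["svc".toList, "hvc".toList, "smc".toList, "brk".toList, "hlt".toList]),
  (6, ["br".toList, "blr".toList, "braa".toList, "brab".toList, "retab".toList]),
  (7, ["nop".toList, "yield".toList, "wfe".toList, "wfi".toList, "sev".toList, "sevl".toList, "isb".toList, "dmb".toList, "dsb".toList])]

-- A's `for key, values in opcodes.items(): if opcode_value in values: return key`
def pvFindLoopA (s : List Char) : List (Int × List (List Char)) → Option Int
  | [] => none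
  | (k, vs) :: rest => if vs.contains s then some k else pvFindLoopA s rest

def find_opcode_key (opcode_value : String) : Option Int :=
  pvFindLoopA opcode_value.toList pvOpcodesTable.items

-- ===== PORT B =====
-- B's module-level table, sorted by opcode (code-point order, as Python compares str)
def pvPairs : List (List Char × Int) :=
  [("b".toList, 0), ("b.al".toList, 1), ("b.cc".toList, 1), ("b.cs".toList, 1), ("b.eq".toList, 1),
   ("b.ge".toList, 1), ("b.gt".toList, 1), ("b.hi".toList, 1), ("b.le".toList, 1), ("b.lo".toList, 1),
   ("b.lt".toList, 1), ("b.mi".toList, 1), ("b.ne".toList, 1), ("b.nv".toList, 1), ("b.pl".toList, 1),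
   ("b.vc".toList, 1), ("b.vs".toList, 1), ("bl".toList, 0), ("blr".toList, 6), ("blx".toList, 0),
   ("br".toList, 6), ("braa".toList, 6), ("brab".toList, 6), ("brk".toList, 5), ("bx".toList, 0),
   ("cbnz".toList, 2), ("cbz".toList, 2), ("dmb".toList, 7), ("dsb".toList, 7), ("eret".toList, 4),
   ("hlt".toList, 5), ("hvc".toList, 5), ("isb".toList, 7), ("nop".toList, 7), ("ret".toList, 4),
   ("retab".toList, 6), ("sev".toList, 7), ("sevl".toList, 7), ("smc".toList, 5), ("svc".toList, 5),
   ("tbnz".toList, 3), ("tbz".toList, 3), ("wfe".toList, 7), ("wfi".toList, 7), ("yield".toList, 7)]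

-- Python's `<` on str: code-point lexicographic comparison, hand-ported (exact for all strings)
def pvStrLt : List Char → List Char → Bool
  | _, [] => false
  | [], _ :: _ => true
  | a :: as, b :: bs => if a < b then true else if b < a then false else pvStrLt as bs

-- B's `while lo < hi:` binary-search loop, step for step; the fuel argument only makes the
-- recursion structural (hi - lo strictly decreases each iteration, so pvPairs.length + 1 suffices)
def pvBSearch (s : List Char) (pairs : List (List Char × Int)) : Nat → Nat → Nat → Option Int
  | 0, _, _ => none
  | fuel + 1, lo, hi =>
    if lo < hi then
      let mid := (lo + hi) / 2
      match pairs[mid]? with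
      | none => none   -- unreachable in B (mid < hi ≤ len); keeps the port total
      | some (v, k) =>
        if v == s then some k
        else if pvStrLt v s then pvBSearch s pairs fuel (mid + 1) hi
        else pvBSearch s pairs fuel lo mid
    else none

def find_opcode_key_alt (opcode_value : String) : Option Int :=
  pvBSearch opcode_value.toList pvPairs (pvPairs.length + 1) 0 pvPairs.length

-- ===== PRECONDITION & SPEC =====
def Spec_find_opcode_key (opcode_value : String) (out : Option Int) : Prop := out = find_opcode_key_alt opcode_value
instance (opcode_value : String) (out : Option Int) : Decidable (Spec_find_opcode_key opcode_value out) := by unfold Spec_find_opcode_key; infer_instance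

-- ===== CLAIM (what is proved, stated in full; the proofs are below) =====
def Claim_equal_find_opcode_key : Prop := ∀ (opcode_value : String), Dom_find_opcode_key opcode_value → Spec_find_opcode_key opcode_value (find_opcode_key opcode_value)

-- ===== LEMMAS AND PROOFS =====

-- the 45 opcodes (as character lists), in A's flat order
def pvAllOps : List (List Char) :=
  ["b".toList, "bl".toList, "bx".toList, "blx".toList,
   "b.eq".toList, "b.ne".toList, "b.lt".toList, "b.gt".toList, "b.le".toList, "b.ge".toList,
   "b.hi".toList, "b.lo".toList, "b.pl".toList, "b.mi".toList, "b.vs".toList, "b.vc".toList,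
   "b.cs".toList, "b.cc".toList, "b.al".toList, "b.nv".toList,
   "cbz".toList, "cbnz".toList, "tbz".toList, "tbnz".toList, "ret".toList, "eret".toList,
   "svc".toList, "hvc".toList, "smc".toList, "brk".toList, "hlt".toList,
   "br".toList, "blr".toList, "braa".toList, "brab".toList, "retab".toList,
   "nop".toList, "yield".toList, "wfe".toList, "wfi".toList, "sev".toList, "sevl".toList,
   "isb".toList, "dmb".toList, "dsb".toList]

-- binary search never answers on a key absent from the array
theorem pvBSearch_none (s : List Char) (pairs : List (List Char × Int))
    (hs : s ∉ pairs.map Prod.fst) (fuel lo hi : Nat) : pvBSearch s pairs fuel lo hi = none := by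
  induction fuel generalizing lo hi with
  | zero => rfl
  | succ fuel ih =>
      simp only [pvBSearch]
      split
      · cases hget : pairs[(lo + hi) / 2]? with
        | none => rfl
        | some p =>
            obtain ⟨v, k⟩ := p
            by_cases hv : v == s
            · exfalso
              apply hs
              have : v = s := by simpa using hv
              subst this
              exact List.mem_map_of_mem (List.mem_of_getElem? hget)
            · simp only [hv, Bool.false_eq_true, if_false]
              split <;> exact ih _ _
      · rfl

-- A's loop answers none when no group contains the string
theorem pvFindLoopA_none (s : List Char) (groups : List (Int × List (List Char)))
    (h : ∀ kv ∈ groups, s ∉ kv.2) : pvFindLoopA s groups = none := by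
  induction groups with
  | nil => rfl
  | cons kv rest ih =>
      obtain ⟨k, vs⟩ := kv
      simp only [pvFindLoopA]
      rw [if_neg (by simpa using h (k, vs) List.mem_cons_self)]
      exact ih fun kv hkv => h kv (List.mem_cons_of_mem _ hkv)

-- ===== VERDICT (by name: the statement is the Claim_ definition above) =====
set_option maxRecDepth 8000 in
theorem find_opcode_key_spec : Claim_equal_find_opcode_key := by
  intro s _
  unfold Spec_find_opcode_key find_opcode_key find_opcode_key_alt
  by_cases h : s.toList ∈ pvAllOps
  · -- s is one of the 45 opcodes: finitely many cases, computed
    simp only [pvAllOps, List.mem_cons, List.not_mem_nil, or_false] at h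
    rcases h with h|h|h|h|h|h|h|h|h|h|h|h|h|h|h|h|h|h|h|h|h|h|h|h|h|h|h|h|h|h|h|h|h|h|h|h|h|h|h|h|h|h|h|h|h <;>
      rw [h] <;> decide
  · -- s is unknown: both sides return none
    rw [pvFindLoopA_none _ _ (fun kv hkv hc =>
          h ((by decide : ∀ kv ∈ pvOpcodesTable.items, kv.2 ⊆ pvAllOps) kv hkv hc)),
        pvBSearch_none _ _ (fun hmem =>
          h (((by decide : (pvPairs.map Prod.fst).Perm pvAllOps)).mem_iff.mp hmem))]
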